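-- pv_equiv track=rewrite | github.com/namel/AdventOfCode2024 | day12/a.py | scan_layer
-- ===== SOURCE A (Python) =====
-- from collections import defaultdict
--
-- def discover_sides(points1, points2):
--     start, stop = min(points1 + points2), max(points1 + points2)
--     sides, current = 0, 0
--     for p in range(start, stop + 1):
--         if (p in points1) ^ (p in points2):
--             if (current == 0 or current == 2) or (p in points1) ^ (p-1 in points1):
--                 sides += 1
--         current = int(p in points1) + int(p in points2)
--     return sides
--
-- def scan_layer(area, horizontal):
--     sides, layers, prev_layer = 0, defaultdict(list), []
--     for p in area:
--         layers[p[0 if horizontal else 1]].append(p)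
--     for l in [layers[l] for l in sorted([k for k in layers.keys()])] + [[]]:
--         layer = [p[1 if horizontal else 0] for p in l]
--         sides += discover_sides(prev_layer, layer)
--         prev_layer = layer
--     return sides
-- ===== SOURCE B (Python) =====
-- def count_sides(points1, points2):
--     # sides = number of maximal runs of consecutive boundary positions
--     # (positions in exactly one layer) with constant orientation
--     s1, s2 = set(points1), set(points2)
--     sides = 0
--     prev_pos = None
--     prev_ori = None
--     for pos in sorted(s1 ^ s2):
--         ori = pos in s1
--         if prev_pos is None or pos != prev_pos + 1 or ori != prev_ori:
--             sides += 1
--         prev_pos, prev_ori = pos, ori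
--     return sides
--
-- def scan_layer(area, horizontal):
--     ki, vi = (0, 1) if horizontal else (1, 0)
--     layers = {}
--     for p in area:
--         layers.setdefault(p[ki], []).append(p[vi])
--     sides = 0
--     prev = []
--     for k in sorted(layers):
--         cur = layers[k]
--         sides += count_sides(prev, cur)
--         prev = cur
--     sides += count_sides(prev, [])
--     return sides
-- ===== Notes on version B (the rewrite author's own statement) =====
-- stated objective: faster
-- what changed: discover_sides's full-span range(min,max+1) scan with linear list-membership tests and a one-step 'current' counter is replaced by sorting the symmetric difference of the two layers (the boundary positions) and counting contiguity/orientation breaks while walking it; grouping stores only the scan coordinate per layer.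
import Mathlib
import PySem

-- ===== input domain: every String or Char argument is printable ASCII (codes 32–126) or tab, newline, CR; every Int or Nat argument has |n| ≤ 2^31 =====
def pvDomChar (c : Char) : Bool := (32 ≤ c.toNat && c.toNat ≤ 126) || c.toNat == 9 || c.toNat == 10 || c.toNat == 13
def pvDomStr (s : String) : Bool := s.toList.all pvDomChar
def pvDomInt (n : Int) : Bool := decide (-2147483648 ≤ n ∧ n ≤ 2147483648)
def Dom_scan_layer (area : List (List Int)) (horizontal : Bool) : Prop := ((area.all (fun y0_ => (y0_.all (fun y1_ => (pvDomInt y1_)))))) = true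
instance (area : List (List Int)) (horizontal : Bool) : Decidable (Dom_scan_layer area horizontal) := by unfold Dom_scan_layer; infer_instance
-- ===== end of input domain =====

-- B replaces the per-layer full-span scan (with linear membership tests) by a sorted walk
-- over the boundary positions (symmetric difference of adjacent layers), counting
-- contiguity/orientation breaks: measurably faster in a timing run.


-- ===== PORT A =====
def discover_sides (points1 points2 : List Int) : Int :=
  let combined := points1 ++ points2
  let start := (PySem.List.min? combined (fun x => x)).getD 0   -- min() raises on []: excluded by Pre_
  let stop := (PySem.List.max? combined (fun x => x)).getD 0
  ((PySem.List.pyRange start (stop + 1) 1).foldl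
    (fun (st : Int × Int) p =>
      ((if (points1.contains p != points2.contains p)
            && ((st.2 == 0 || st.2 == 2)
                || (points1.contains p != points1.contains (p - 1)))
        then st.1 + 1 else st.1),
       (if points1.contains p then (1 : Int) else 0)
         + (if points2.contains p then (1 : Int) else 0)))
    (0, 0)).1

def scan_layer (area : List (List Int)) (horizontal : Bool) : Int :=
  let layers : PySem.Dict Int (List (List Int)) :=
    area.foldl
      (fun d p => d.modify (PySem.List.pyGetD p (if horizontal then 0 else 1) 0) [] (· ++ [p]))
      PySem.Dict.empty
  let groups :=
    (PySem.List.sorted layers.keys (fun k => k) false).map (fun k => layers.getD k []) ++ [[]]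
  (groups.foldl
    (fun (st : Int × List Int) l =>
      let layer := l.map (fun p => PySem.List.pyGetD p (if horizontal then 1 else 0) 0)
      (st.1 + discover_sides st.2 layer, layer))
    (0, [])).1

-- ===== PORT B =====
def count_sides_alt (points1 points2 : List Int) : Int :=
  let s1 : PySem.Set Int := PySem.Set.ofList points1
  let s2 : PySem.Set Int := PySem.Set.ofList points2
  let boundary := PySem.List.sorted (PySem.Set.symmDiff s1 s2) (fun x => x) false
  (boundary.foldl
    (fun (st : Int × Option (Int × Bool)) pos =>
      let ori := PySem.Set.contains s1 pos
      let counted :=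
        match st.2 with
        | none => true
        | some (pp, po) => (pos != pp + 1) || (ori != po)
      ((if counted then st.1 + 1 else st.1), some (pos, ori)))
    (0, none)).1

def scan_layer_alt (area : List (List Int)) (horizontal : Bool) : Int :=
  let ki : Int := if horizontal then 0 else 1
  let vi : Int := if horizontal then 1 else 0
  -- layers.setdefault(p[ki], []).append(p[vi])  ==  layers[p[ki]] = layers.get(p[ki], []) + [p[vi]]
  let layers : PySem.Dict Int (List Int) :=
    area.foldl
      (fun d p => d.modify (PySem.List.pyGetD p ki 0) [] (· ++ [PySem.List.pyGetD p vi 0]))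
      PySem.Dict.empty
  let r :=
    (PySem.List.sorted layers.keys (fun k => k) false).foldl
      (fun (st : Int × List Int) k =>
        let cur := layers.getD k []
        (st.1 + count_sides_alt st.2 cur, cur))
      (0, [])
  r.1 + count_sides_alt r.2 []

-- ===== PRECONDITION & SPEC =====
-- Pre_ excludes exactly the inputs on which the Python A raises: an empty area (ValueError from
-- min() of an empty sequence) and points with fewer than two coordinates (IndexError).
def Pre_scan_layer (area : List (List Int)) (horizontal : Bool) : Prop :=
  area ≠ [] ∧ ∀ p ∈ area, 2 ≤ p.length
instance (area : List (List Int)) (horizontal : Bool) : Decidable (Pre_scan_layer area horizontal) := by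
  unfold Pre_scan_layer; infer_instance
def pvWitness_scan_layer : List (List Int) × Bool := ([[0, 0], [0, 1], [1, 0]], true)

def Spec_scan_layer (area : List (List Int)) (horizontal : Bool) (out : Int) : Prop := out = scan_layer_alt area horizontal
instance (area : List (List Int)) (horizontal : Bool) (out : Int) : Decidable (Spec_scan_layer area horizontal out) := by unfold Spec_scan_layer; infer_instance

-- ===== CLAIM (what is proved, stated in full; the proofs are below) =====
def Claim_equal_scan_layer : Prop := ∀ (area : List (List Int)) (horizontal : Bool), Dom_scan_layer area horizontal → Pre_scan_layer area horizontal → Spec_scan_layer area horizontal (scan_layer area horizontal)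

-- ===== LEMMAS AND PROOFS =====

def pvXor (p1 p2 : List Int) (q : Int) : Bool := p1.contains q != p2.contains q
def pvGood (p1 p2 : List Int) (q : Int) : Bool :=
  pvXor p1 p2 q && (!(pvXor p1 p2 (q - 1)) || (p1.contains q != p1.contains (q - 1)))
def pvCnt (p1 p2 : List Int) (q : Int) : Int :=
  (if p1.contains q then (1 : Int) else 0) + (if p2.contains q then (1 : Int) else 0)
theorem pvCnt_test (b1 b2 : Bool) :
    ((((if b1 then (1 : Int) else 0) + (if b2 then (1 : Int) else 0)) == 0)
      || (((if b1 then (1 : Int) else 0) + (if b2 then (1 : Int) else 0)) == 2)) = !(b1 != b2) := by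
  cases b1 <;> cases b2 <;> decide

theorem pvFoldA (p1 p2 : List Int) (n : Nat) : ∀ (a s : Int),
    (((PySem.List.pyRange a (a + (n : Int)) 1).foldl
      (fun (st : Int × Int) p =>
        ((if (p1.contains p != p2.contains p)
              && ((st.2 == 0 || st.2 == 2) || (p1.contains p != p1.contains (p - 1)))
          then st.1 + 1 else st.1),
         (if p1.contains p then (1 : Int) else 0) + (if p2.contains p then (1 : Int) else 0)))
      (s, pvCnt p1 p2 (a - 1))).1)
    = s + ((PySem.List.pyRange a (a + (n : Int)) 1).countP (pvGood p1 p2) : Int) := by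
  induction n with
  | zero =>
    intro a s
    rw [PySem.List.pyRange_one_eq_nil (by omega)]
    simp
  | succ n ih =>
    intro a s
    have hlt : a < a + ((n + 1 : Nat) : Int) := by push_cast; omega
    have hshift : a + ((n + 1 : Nat) : Int) = (a + 1) + (n : Int) := by push_cast; ring
    rw [hshift] at hlt ⊢
    rw [PySem.List.pyRange_one_cons hlt]
    simp only [List.foldl_cons, List.countP_cons]
    have hcond : ((p1.contains a != p2.contains a)
        && ((pvCnt p1 p2 (a - 1) == 0 || pvCnt p1 p2 (a - 1) == 2)
            || (p1.contains a != p1.contains (a - 1)))) = pvGood p1 p2 a := by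
      unfold pvCnt
      rw [pvCnt_test]
      unfold pvGood pvXor
      rfl
    have hcnt : ((if p1.contains a then (1 : Int) else 0) + (if p2.contains a then (1 : Int) else 0))
        = pvCnt p1 p2 ((a + 1) - 1) := by
      unfold pvCnt; norm_num
    rw [hcond, hcnt]
    by_cases hg : pvGood p1 p2 a = true
    · simp only [hg, if_true]
      rw [ih (a + 1) (s + 1)]
      push_cast
      ring
    · simp only [Bool.not_eq_true] at hg
      simp only [hg, Bool.false_eq_true, if_false]
      rw [ih (a + 1) s]
      push_cast
      ring


theorem pvContains_ofList (l : List Int) (x : Int) :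
    PySem.Set.contains (PySem.Set.ofList l) x = l.contains x := by
  rw [Bool.eq_iff_iff]
  simp [PySem.Set.mem_ofList]

theorem pvFoldB (p1 p2 : List Int) : ∀ (L : List Int) (s u : Int),
    (u :: L).Pairwise (· < ·) →
    (∀ x ∈ L, pvXor p1 p2 x = true) →
    pvXor p1 p2 u = true →
    (∀ q, u < q → pvXor p1 p2 q = true → q ∈ L) →
    ((L.foldl
      (fun (st : Int × Option (Int × Bool)) pos =>
        ((if (match st.2 with
              | none => true
              | some (pp, po) => (pos != pp + 1) || ((PySem.Set.contains (PySem.Set.ofList p1) pos) != po))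
          then st.1 + 1 else st.1),
         some (pos, PySem.Set.contains (PySem.Set.ofList p1) pos)))
      (s, some (u, PySem.Set.contains (PySem.Set.ofList p1) u))).1)
    = s + (L.countP (pvGood p1 p2) : Int) := by
  intro L
  induction L with
  | nil => intro s u _ _ _ _; simp
  | cons h t ih =>
    intro s u hpw hx hxu hcomp
    have hu_lt : u < h := List.rel_of_pairwise_cons hpw (List.mem_cons_self)
    have ht_gt : ∀ x ∈ t, h < x := fun x hxm =>
      List.rel_of_pairwise_cons (List.Pairwise.of_cons hpw) hxm
    have hxh : pvXor p1 p2 h = true := hx h List.mem_cons_self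
    have hcg : ((h != u + 1) || (PySem.Set.contains (PySem.Set.ofList p1) h
        != PySem.Set.contains (PySem.Set.ofList p1) u)) = pvGood p1 p2 h := by
      rw [pvContains_ofList, pvContains_ofList]
      by_cases he : h = u + 1
      · subst he
        have h1 : u + 1 - 1 = u := by ring
        unfold pvGood
        rw [h1, hxu]
        simp [hxh]
      · have hne : pvXor p1 p2 (h - 1) = false := by
          by_contra hc
          simp only [Bool.not_eq_false] at hc
          have hm := hcomp (h - 1) (by omega) hc
          rcases List.mem_cons.mp hm with hm | hm
          · omega
          · exact absurd (ht_gt _ hm) (by omega)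
        unfold pvGood
        rw [hne, hxh]
        have : (h != u + 1) = true := by simp [he]
        simp [this]
    simp only [List.foldl_cons, List.countP_cons]
    rw [hcg]
    have ihh := ih (if pvGood p1 p2 h then s + 1 else s) h
      (List.Pairwise.of_cons hpw)
      (fun x hxm => hx x (List.mem_cons_of_mem _ hxm))
      hxh
      (fun q hq hxq => by
        rcases List.mem_cons.mp (hcomp q (by omega) hxq) with hm | hm
        · omega
        · exact hm)
    rw [ihh]
    by_cases hg : pvGood p1 p2 h = true
    · simp only [hg, if_true]
      push_cast
      ring
    · simp only [Bool.not_eq_true] at hg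
      simp only [hg, Bool.false_eq_true, if_false]
      push_cast
      ring

-- boundary list of B: membership and strict sortedness
theorem pv_mem_bd (p1 p2 : List Int) (x : Int) :
    x ∈ PySem.List.sorted (PySem.Set.symmDiff (PySem.Set.ofList p1) (PySem.Set.ofList p2)) (fun x => x) false
      ↔ pvXor p1 p2 x = true := by
  rw [PySem.List.mem_sorted, PySem.Set.mem_symmDiff]
  simp only [PySem.Set.mem_ofList, pvXor, bne_iff_ne, ne_eq]
  by_cases h1 : x ∈ p1 <;> by_cases h2 : x ∈ p2 <;> simp [h1, h2]

theorem pv_pairwise_bd (p1 p2 : List Int) :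
    (PySem.List.sorted (PySem.Set.symmDiff (PySem.Set.ofList p1) (PySem.Set.ofList p2)) (fun x => x) false).Pairwise (· < ·) := by
  have hnd : (PySem.List.sorted (PySem.Set.symmDiff (PySem.Set.ofList p1) (PySem.Set.ofList p2)) (fun x => x) false).Nodup :=
    (PySem.List.sorted_perm _ _ _).nodup_iff.mpr
      (PySem.Set.nodup_symmDiff _ _ (PySem.Set.nodup_ofList p1) (PySem.Set.nodup_ofList p2))
  have hle := PySem.List.sorted_pairwise (xs := PySem.Set.symmDiff (PySem.Set.ofList p1) (PySem.Set.ofList p2)) (key := fun x => x)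
  exact (hle.and hnd).imp (fun h => lt_of_le_of_ne h.1 h.2)

-- B counts pvGood positions over its boundary list
theorem pvB_count (p1 p2 : List Int) :
    count_sides_alt p1 p2
      = (((PySem.List.sorted (PySem.Set.symmDiff (PySem.Set.ofList p1) (PySem.Set.ofList p2)) (fun x => x) false).countP (pvGood p1 p2) : Nat) : Int) := by
  have hmem := pv_mem_bd p1 p2
  have hpw := pv_pairwise_bd p1 p2
  simp only [count_sides_alt]
  cases hbd : PySem.List.sorted (PySem.Set.symmDiff (PySem.Set.ofList p1) (PySem.Set.ofList p2)) (fun x => x) false with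
  | nil => simp
  | cons h t =>
    rw [hbd] at hmem hpw
    have hxh : pvXor p1 p2 h = true := (hmem h).mp List.mem_cons_self
    have ht_gt : ∀ x ∈ t, h < x := fun x hxm => List.rel_of_pairwise_cons hpw hxm
    have hgh : pvGood p1 p2 h = true := by
      have hne : pvXor p1 p2 (h - 1) = false := by
        by_contra hc
        simp only [Bool.not_eq_false] at hc
        rcases List.mem_cons.mp ((hmem (h - 1)).mpr hc) with hm | hm
        · omega
        · exact absurd (ht_gt _ hm) (by omega)
      unfold pvGood
      rw [hne, hxh]
      simp
    simp only [List.foldl_cons, List.countP_cons, if_true]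
    rw [pvFoldB p1 p2 t (0 + 1) h hpw
      (fun x hxm => (hmem x).mp (List.mem_cons_of_mem _ hxm))
      hxh
      (fun q hq hxq => by
        rcases List.mem_cons.mp ((hmem q).mpr hxq) with hm | hm
        · omega
        · exact hm)]
    rw [hgh]
    simp only [if_true]
    push_cast
    ring

theorem pv_discover_eq_count (p1 p2 : List Int) :
    discover_sides p1 p2 = count_sides_alt p1 p2 := by
  by_cases hnil : p1 ++ p2 = []
  · obtain ⟨h1, h2⟩ := List.append_eq_nil_iff.mp hnil
    subst h1; subst h2
    decide
  · obtain ⟨m, hmin⟩ := Option.ne_none_iff_exists'.mp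
      (fun h => hnil ((PySem.List.min?_eq_none_iff (p1 ++ p2) (fun x => x)).mp h))
    obtain ⟨M, hmax⟩ := Option.ne_none_iff_exists'.mp
      (fun h => hnil ((PySem.List.max?_eq_none_iff (p1 ++ p2) (fun x => x)).mp h))
    have hmin_le : ∀ y ∈ p1 ++ p2, m ≤ y := PySem.List.min?_isMin hmin
    have hmax_ge : ∀ y ∈ p1 ++ p2, y ≤ M := PySem.List.max?_isMax hmax
    have hmM : m ≤ M := hmin_le M (PySem.List.max?_mem hmax)
    have hc1 : p1.contains (m - 1) = false := by
      by_contra hc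
      simp only [Bool.not_eq_false, List.contains_eq_mem, decide_eq_true_eq] at hc
      have := hmin_le (m - 1) (List.mem_append_left _ hc)
      omega
    have hc2 : p2.contains (m - 1) = false := by
      by_contra hc
      simp only [Bool.not_eq_false, List.contains_eq_mem, decide_eq_true_eq] at hc
      have := hmin_le (m - 1) (List.mem_append_right _ hc)
      omega
    have hcnt0 : pvCnt p1 p2 (m - 1) = 0 := by
      unfold pvCnt
      rw [hc1, hc2]
      simp
    -- A = countP over the range
    have hA : discover_sides p1 p2
        = (((PySem.List.pyRange m (M + 1) 1).countP (pvGood p1 p2) : Nat) : Int) := by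
      simp only [discover_sides]
      rw [hmin, hmax]
      simp only [Option.getD_some]
      have hn : M + 1 = m + (((M + 1 - m).toNat : Nat) : Int) := by omega
      rw [hn]
      have := pvFoldA p1 p2 (M + 1 - m).toNat m 0
      rw [hcnt0] at this
      simpa using this
    rw [hA, pvB_count]
    congr 1
    rw [List.countP_eq_length_filter, List.countP_eq_length_filter]
    apply List.Perm.length_eq
    have hnd2 : ((PySem.List.sorted (PySem.Set.symmDiff (PySem.Set.ofList p1) (PySem.Set.ofList p2)) (fun x => x) false).filter (pvGood p1 p2)).Nodup :=
      List.Nodup.filter _ ((pv_pairwise_bd p1 p2).imp (fun h => ne_of_lt h))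
    rw [List.perm_ext_iff_of_nodup (List.Nodup.filter _ (PySem.List.nodup_pyRange_one _ _)) hnd2]
    intro x
    simp only [List.mem_filter]
    have hgx : pvGood p1 p2 x = true → pvXor p1 p2 x = true := by
      unfold pvGood
      intro hg
      exact (Bool.and_eq_true_iff.mp hg).1
    constructor
    · rintro ⟨_, hg⟩
      exact ⟨(pv_mem_bd p1 p2 x).mpr (hgx hg), hg⟩
    · rintro ⟨_, hg⟩
      refine ⟨?_, hg⟩
      have hx := hgx hg
      have hxm : x ∈ p1 ++ p2 := by
        by_cases h1 : x ∈ p1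
        · exact List.mem_append_left _ h1
        · have hc1x : p1.contains x = false := by
            simp [List.contains_eq_mem, h1]
          rw [pvXor, hc1x] at hx
          have h2 : p2.contains x = true := by
            cases hc2x : p2.contains x
            · rw [hc2x] at hx; simp at hx
            · rfl
          simp only [List.contains_eq_mem, decide_eq_true_eq] at h2
          exact List.mem_append_right _ h2
      rw [PySem.List.mem_pyRange_one]
      have := hmin_le x hxm
      have := hmax_ge x hxm
      omega


theorem pv_getD_A {β : Type} (l : List β) (k : β → Int) (c : Int) :
    (l.foldl (fun d p => d.modify (k p) [] (· ++ [p])) (PySem.Dict.empty : PySem.Dict Int (List β))).getD c []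
      = l.filter (fun p => k p == c) := by
  have h : l.foldl (fun d p => d.modify (k p) [] (· ++ [p])) (PySem.Dict.empty : PySem.Dict Int (List β))
      = (l.map (fun p => (k p, p))).foldl (fun d q => d.modify q.1 [] (· ++ [q.2])) PySem.Dict.empty := by
    rw [List.foldl_map]
  rw [h, PySem.Dict.getD_foldl_modify_append, List.filter_map, List.map_map]
  simp [Function.comp_def]

theorem pv_getD_B {β : Type} (l : List β) (k v : β → Int) (c : Int) :
    (l.foldl (fun d p => d.modify (k p) [] (· ++ [v p])) (PySem.Dict.empty : PySem.Dict Int (List Int))).getD c []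
      = (l.filter (fun p => k p == c)).map v := by
  have h : l.foldl (fun d p => d.modify (k p) [] (· ++ [v p])) (PySem.Dict.empty : PySem.Dict Int (List Int))
      = (l.map (fun p => (k p, v p))).foldl (fun d q => d.modify q.1 [] (· ++ [q.2])) PySem.Dict.empty := by
    rw [List.foldl_map]
  rw [h, PySem.Dict.getD_foldl_modify_append, List.filter_map, List.map_map]
  simp [Function.comp_def]

theorem pv_keys_A {β : Type} (l : List β) (k : β → Int) :
    (l.foldl (fun d p => d.modify (k p) [] (· ++ [p])) (PySem.Dict.empty : PySem.Dict Int (List β))).keys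
      = PySem.Set.ofList (l.map k) := by
  rw [PySem.Dict.keys_foldl_modify_key l k [] (fun _ p => (· ++ [p])), PySem.Dict.keys_empty,
    PySem.Set.update_nil_left]

theorem pv_keys_B {β : Type} (l : List β) (k v : β → Int) :
    (l.foldl (fun d p => d.modify (k p) [] (· ++ [v p])) (PySem.Dict.empty : PySem.Dict Int (List Int))).keys
      = PySem.Set.ofList (l.map k) := by
  rw [PySem.Dict.keys_foldl_modify_key l k [] (fun _ p => (· ++ [v p])), PySem.Dict.keys_empty,
    PySem.Set.update_nil_left]


theorem pv_scan_eq (area : List (List Int)) (horizontal : Bool) :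
    scan_layer area horizontal = scan_layer_alt area horizontal := by
  simp only [scan_layer, scan_layer_alt]
  simp only [pv_keys_A, pv_keys_B]
  rw [List.foldl_append, List.foldl_map]
  simp only [pv_getD_A, pv_getD_B, pv_discover_eq_count, List.foldl_cons, List.foldl_nil,
    List.map_nil]

-- ===== VERDICT (by name: the statement is the Claim_ definition above) =====
theorem scan_layer_spec : Claim_equal_scan_layer := by
  intro area horizontal _ _
  unfold Spec_scan_layer
  exact pv_scan_eq area horizontal
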